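-- pv_equiv track=rewrite | github.com/matjussu/OrientIA | scripts/run_bench_sprint6_apples.py | _select_balanced_subset
-- ===== SOURCE A (Python) =====
-- def _select_balanced_subset(all_queries: list) -> list:
--     """Sélectionne 24 queries balanced (6 par sous-suite). Identique Sprint 5."""
--     by_suite: dict = {}
--     for q in all_queries:
--         s = q["suite"]
--         by_suite.setdefault(s, []).append(q)
--
--     personas_subset = [q for q in by_suite.get("personas_v4", [])
--                        if q["id"].endswith("_q1")][:6]
--     dares_subset = by_suite.get("dares_dedie", [])[:6]
--     blocs_subset = by_suite.get("blocs_dedie", [])[:6]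
--     user_subset = by_suite.get("user_naturel", [])[:6]
--
--     return personas_subset + dares_subset + blocs_subset + user_subset
-- ===== SOURCE B (Python) =====
-- def _select_balanced_subset(all_queries: list) -> list:
--     """24 balanced queries (6 per sub-suite) by direct scans, no grouping dict."""
--     personas_subset = [q for q in all_queries
--                        if q["suite"] == "personas_v4" and q["id"].endswith("_q1")][:6]
--     dares_subset = [q for q in all_queries if q["suite"] == "dares_dedie"][:6]
--     blocs_subset = [q for q in all_queries if q["suite"] == "blocs_dedie"][:6]
--     user_subset = [q for q in all_queries if q["suite"] == "user_naturel"][:6]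
--     return personas_subset + dares_subset + blocs_subset + user_subset
-- ===== Notes on version B (the rewrite author's own statement) =====
-- stated objective: simpler
-- what changed: Drops the by_suite grouping dict entirely: each of the four sub-lists is built by a direct filtered scan of all_queries (with the personas filter short-circuiting before touching q['id']), keeping the same concatenation order.
import Mathlib
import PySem

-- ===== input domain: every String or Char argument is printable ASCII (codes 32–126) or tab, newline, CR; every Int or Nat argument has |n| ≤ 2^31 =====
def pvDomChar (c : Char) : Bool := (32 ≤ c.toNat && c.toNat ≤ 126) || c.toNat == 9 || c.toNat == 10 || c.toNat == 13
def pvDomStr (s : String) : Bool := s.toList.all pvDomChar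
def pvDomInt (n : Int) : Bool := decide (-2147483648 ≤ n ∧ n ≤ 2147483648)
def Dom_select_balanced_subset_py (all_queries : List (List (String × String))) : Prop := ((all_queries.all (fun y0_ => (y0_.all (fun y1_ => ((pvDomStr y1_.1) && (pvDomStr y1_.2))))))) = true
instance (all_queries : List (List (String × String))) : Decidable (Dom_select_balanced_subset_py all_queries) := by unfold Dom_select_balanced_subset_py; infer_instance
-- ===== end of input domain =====

-- B replaces the by_suite grouping dict with four direct filtered scans of all_queries (simpler).

-- ===== PORT A =====
-- shared lookup primitive: q[k] as first-match association-list lookup ("" only outside Pre_, where Python raises KeyError)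
def pvGetKey (q : List (String × String)) (k : String) : String :=
  ((PySem.Dict.mk q).get? k).getD ""

def select_balanced_subset_py (all_queries : List (List (String × String))) : List (List (String × String)) :=
  let by_suite : PySem.Dict String (List (List (String × String))) :=
    all_queries.foldl (fun d q => d.modify (pvGetKey q "suite") [] (fun l => l ++ [q])) PySem.Dict.empty
  let personas_subset := PySem.List.slice
    ((by_suite.getD "personas_v4" []).filter (fun q => PySem.Str.endswith (pvGetKey q "id") "_q1")) none (some 6)
  let dares_subset := PySem.List.slice (by_suite.getD "dares_dedie" []) none (some 6)
  let blocs_subset := PySem.List.slice (by_suite.getD "blocs_dedie" []) none (some 6)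
  let user_subset := PySem.List.slice (by_suite.getD "user_naturel" []) none (some 6)
  personas_subset ++ dares_subset ++ blocs_subset ++ user_subset

-- ===== PORT B =====
def select_balanced_subset_py_alt (all_queries : List (List (String × String))) : List (List (String × String)) :=
  let personas_subset := PySem.List.slice
    (all_queries.filter (fun q => pvGetKey q "suite" == "personas_v4" && PySem.Str.endswith (pvGetKey q "id") "_q1")) none (some 6)
  let dares_subset := PySem.List.slice (all_queries.filter (fun q => pvGetKey q "suite" == "dares_dedie")) none (some 6)
  let blocs_subset := PySem.List.slice (all_queries.filter (fun q => pvGetKey q "suite" == "blocs_dedie")) none (some 6)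
  let user_subset := PySem.List.slice (all_queries.filter (fun q => pvGetKey q "suite" == "user_naturel")) none (some 6)
  personas_subset ++ dares_subset ++ blocs_subset ++ user_subset

-- ===== PRECONDITION & SPEC =====
-- Pre_ excludes exactly the inputs on which Python A raises KeyError: a query without a "suite" key,
-- or a personas_v4 query without an "id" key (q["id"] is read only for personas_v4 queries).
def Pre_select_balanced_subset_py (all_queries : List (List (String × String))) : Prop :=
  ∀ q ∈ all_queries, ((PySem.Dict.mk q).get? "suite").isSome = true ∧
    ((PySem.Dict.mk q).get? "suite" = some "personas_v4" → ((PySem.Dict.mk q).get? "id").isSome = true)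
instance (all_queries : List (List (String × String))) : Decidable (Pre_select_balanced_subset_py all_queries) := by
  unfold Pre_select_balanced_subset_py; infer_instance

def pvWitness_select_balanced_subset_py : (List (List (String × String))) :=
  [[("suite", "dares_dedie")], [("suite", "personas_v4"), ("id", "p1_q1")]]

def Spec_select_balanced_subset_py (all_queries : List (List (String × String))) (out : List (List (String × String))) : Prop := out = select_balanced_subset_py_alt all_queries
instance (all_queries : List (List (String × String))) (out : List (List (String × String))) : Decidable (Spec_select_balanced_subset_py all_queries out) := by unfold Spec_select_balanced_subset_py; infer_instance

-- ===== CLAIM (what is proved, stated in full; the proofs are below) =====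
def Claim_equal_select_balanced_subset_py : Prop := ∀ (all_queries : List (List (String × String))), Dom_select_balanced_subset_py all_queries → Pre_select_balanced_subset_py all_queries → Spec_select_balanced_subset_py all_queries (select_balanced_subset_py all_queries)

-- ===== LEMMAS AND PROOFS =====

-- the grouping dict's bucket at s is exactly the direct filtered scan of the input
theorem group_getD (xs : List (List (String × String)))
    (d : PySem.Dict String (List (List (String × String)))) (s : String) :
    (xs.foldl (fun d q => d.modify (pvGetKey q "suite") [] (fun l => l ++ [q])) d).getD s []
      = d.getD s [] ++ xs.filter (fun q => pvGetKey q "suite" == s) := by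
  induction xs generalizing d with
  | nil => simp
  | cons x xs ih =>
    simp only [List.foldl_cons, List.filter_cons, ih]
    by_cases h : pvGetKey x "suite" = s
    · subst h
      rw [PySem.Dict.getD_modify_self]
      simp
    · rw [PySem.Dict.getD_modify_of_ne _ _ _ (fun hs => h hs.symm)]
      simp [h]

-- ===== VERDICT (by name: the statement is the Claim_ definition above) =====
theorem select_balanced_subset_py_spec : Claim_equal_select_balanced_subset_py := by
  intro all_queries _ _
  show select_balanced_subset_py all_queries = select_balanced_subset_py_alt all_queries
  unfold select_balanced_subset_py select_balanced_subset_py_alt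
  simp only [group_getD, PySem.Dict.getD_empty, List.nil_append, List.filter_filter]
  congr 4
  exact List.filter_congr (fun q _ => Bool.and_comm _ _)
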